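-- pv_equiv track=rewrite | github.com/davidsuarezgnz/mit-paper-free-transfers | src/models/oip_model.py | map_fifa_positions_to_role
-- ===== SOURCE A (Python) =====
-- def map_fifa_positions_to_role(positions_str: str) -> str | None:
--     """
--     Map FIFA 'player_positions' string (e.g. 'ST, CF, RW') to a high-level role:
--     Goalkeeper, Centre-Back, Full-Back, Midfielder, Winger, Forward
--     """
--     if not isinstance(positions_str, str) or positions_str.strip() == "":
--         return None
--
--     # Normalize
--     positions = [p.strip().upper() for p in positions_str.split(",")]
--
--     # Priority order: GK -> CB -> FB -> MF -> W -> FW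
--     # (para evitar ambigüedades, miramos en orden)
--
--     # 1) Goalkeeper
--     if "GK" in positions:
--         return "Goalkeeper"
--
--     # 2) Centre-Back (central defenders)
--     cb_set = {"CB", "LCB", "RCB"}
--     if any(p in cb_set for p in positions):
--         return "Centre-Back"
--
--     # 3) Full-Back (laterales, carrileros)
--     fb_set = {"LB", "RB", "LWB", "RWB"}
--     if any(p in fb_set for p in positions):
--         return "Full-Back"
--
--     # 4) Winger (extremos y wide AM)
--     winger_set = {"LW", "RW", "LM", "RM", "LAM", "RAM"}
--     if any(p in winger_set for p in positions):
--         return "Winger"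
--
--     # 5) Forward (delanteros centro / segunda punta)
--     fw_set = {"ST", "CF", "LS", "RS", "LF", "RF"}
--     if any(p in fw_set for p in positions):
--         return "Forward"
--
--     # 6) Midfielder (resto de mediocampistas)
--     mf_set = {"CDM", "LDM", "RDM", "CM", "LCM", "RCM", "CAM"}
--     if any(p in mf_set for p in positions):
--         return "Midfielder"
--
--     # Si algo raro, devolvemos None y luego podemos decidir qué hacer
--     return None
-- ===== SOURCE B (Python) =====
-- _ROLE_TABLE = {
--     "GK": (0, "Goalkeeper"),
--     "CB": (1, "Centre-Back"), "LCB": (1, "Centre-Back"), "RCB": (1, "Centre-Back"),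
--     "LB": (2, "Full-Back"), "RB": (2, "Full-Back"), "LWB": (2, "Full-Back"), "RWB": (2, "Full-Back"),
--     "LW": (3, "Winger"), "RW": (3, "Winger"), "LM": (3, "Winger"),
--     "RM": (3, "Winger"), "LAM": (3, "Winger"), "RAM": (3, "Winger"),
--     "ST": (4, "Forward"), "CF": (4, "Forward"), "LS": (4, "Forward"),
--     "RS": (4, "Forward"), "LF": (4, "Forward"), "RF": (4, "Forward"),
--     "CDM": (5, "Midfielder"), "LDM": (5, "Midfielder"), "RDM": (5, "Midfielder"),
--     "CM": (5, "Midfielder"), "LCM": (5, "Midfielder"), "RCM": (5, "Midfielder"),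
--     "CAM": (5, "Midfielder"),
-- }
--
--
-- def map_fifa_positions_to_role(positions_str):
--     if not isinstance(positions_str, str) or positions_str.strip() == "":
--         return None
--     best = None
--     for raw in positions_str.split(","):
--         pair = _ROLE_TABLE.get(raw.strip().upper())
--         if pair is not None and (best is None or pair[0] < best[0]):
--             best = pair
--     return None if best is None else best[1]
-- ===== Notes on version B (the rewrite author's own statement) =====
-- stated objective: alternative
-- what changed: Replaced the six-way if-chain over six role sets (up to six scans of the position list) by one flat token->(priority,role) dictionary and a single pass that keeps the pair with the smallest priority seen.
import Mathlib
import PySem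

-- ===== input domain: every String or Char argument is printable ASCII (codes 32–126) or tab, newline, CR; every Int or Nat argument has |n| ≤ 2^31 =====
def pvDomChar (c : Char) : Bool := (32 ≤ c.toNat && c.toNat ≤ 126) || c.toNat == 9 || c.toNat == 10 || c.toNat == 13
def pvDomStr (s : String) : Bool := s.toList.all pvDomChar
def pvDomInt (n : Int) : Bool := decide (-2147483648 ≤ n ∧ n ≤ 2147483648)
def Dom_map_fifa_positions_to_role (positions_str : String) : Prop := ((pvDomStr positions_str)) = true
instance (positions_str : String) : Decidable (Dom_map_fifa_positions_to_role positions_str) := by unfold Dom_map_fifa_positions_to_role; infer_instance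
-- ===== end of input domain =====

-- B replaces A's six-way if-chain over six role sets by one flat token->(priority,role)
-- dictionary and a single pass keeping the pair with the smallest priority (alternative decomposition).

-- ===== PORT A =====
def cbSet : PySem.Set String := PySem.Set.ofList ["CB", "LCB", "RCB"]
def fbSet : PySem.Set String := PySem.Set.ofList ["LB", "RB", "LWB", "RWB"]
def wingerSet : PySem.Set String := PySem.Set.ofList ["LW", "RW", "LM", "RM", "LAM", "RAM"]
def fwSet : PySem.Set String := PySem.Set.ofList ["ST", "CF", "LS", "RS", "LF", "RF"]
def mfSet : PySem.Set String := PySem.Set.ofList ["CDM", "LDM", "RDM", "CM", "LCM", "RCM", "CAM"]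

def map_fifa_positions_to_role (positions_str : String) : Option String :=
  if PySem.Str.strip positions_str == "" then none
  else
    let positions := ((PySem.Str.split? positions_str ",").getD []).map
      (fun p => PySem.Str.upper (PySem.Str.strip p))  -- sep "," ≠ "": split? is always some
    if positions.contains "GK" then some "Goalkeeper"
    else if positions.any (fun p => PySem.Set.contains cbSet p) then some "Centre-Back"
    else if positions.any (fun p => PySem.Set.contains fbSet p) then some "Full-Back"
    else if positions.any (fun p => PySem.Set.contains wingerSet p) then some "Winger"
    else if positions.any (fun p => PySem.Set.contains fwSet p) then some "Forward"
    else if positions.any (fun p => PySem.Set.contains mfSet p) then some "Midfielder"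
    else none

-- ===== PORT B =====
def roleTable : PySem.Dict String (Int × String) := PySem.Dict.ofList
  [("GK", (0, "Goalkeeper")),
   ("CB", (1, "Centre-Back")), ("LCB", (1, "Centre-Back")), ("RCB", (1, "Centre-Back")),
   ("LB", (2, "Full-Back")), ("RB", (2, "Full-Back")), ("LWB", (2, "Full-Back")), ("RWB", (2, "Full-Back")),
   ("LW", (3, "Winger")), ("RW", (3, "Winger")), ("LM", (3, "Winger")),
   ("RM", (3, "Winger")), ("LAM", (3, "Winger")), ("RAM", (3, "Winger")),
   ("ST", (4, "Forward")), ("CF", (4, "Forward")), ("LS", (4, "Forward")),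
   ("RS", (4, "Forward")), ("LF", (4, "Forward")), ("RF", (4, "Forward")),
   ("CDM", (5, "Midfielder")), ("LDM", (5, "Midfielder")), ("RDM", (5, "Midfielder")),
   ("CM", (5, "Midfielder")), ("LCM", (5, "Midfielder")), ("RCM", (5, "Midfielder")),
   ("CAM", (5, "Midfielder"))]

def map_fifa_positions_to_role_alt (positions_str : String) : Option String :=
  if PySem.Str.strip positions_str == "" then none
  else
    let best := ((PySem.Str.split? positions_str ",").getD []).foldl  -- sep "," ≠ "": split? is always some
      (fun best raw =>
        match PySem.Dict.get? roleTable (PySem.Str.upper (PySem.Str.strip raw)) with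
        | none => best
        | some pair =>
          match best with
          | none => some pair
          | some b => if pair.1 < b.1 then some pair else best)
      none
    match best with
    | none => none
    | some b => some b.2

-- ===== PRECONDITION & SPEC =====
def Spec_map_fifa_positions_to_role (positions_str : String) (out : Option String) : Prop := out = map_fifa_positions_to_role_alt positions_str
instance (positions_str : String) (out : Option String) : Decidable (Spec_map_fifa_positions_to_role positions_str out) := by unfold Spec_map_fifa_positions_to_role; infer_instance

-- ===== CLAIM (what is proved, stated in full; the proofs are below) =====
def Claim_equal_map_fifa_positions_to_role : Prop := ∀ (positions_str : String), Dom_map_fifa_positions_to_role positions_str → Spec_map_fifa_positions_to_role positions_str (map_fifa_positions_to_role positions_str)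

-- ===== LEMMAS AND PROOFS =====

-- proof-side lookup of a token's priority index (0..5), in the dict's key order
def idxN (p : String) : Option Nat :=
  if "GK" == p then some 0
  else if "CB" == p then some 1 else if "LCB" == p then some 1 else if "RCB" == p then some 1
  else if "LB" == p then some 2 else if "RB" == p then some 2 else if "LWB" == p then some 2 else if "RWB" == p then some 2
  else if "LW" == p then some 3 else if "RW" == p then some 3 else if "LM" == p then some 3
  else if "RM" == p then some 3 else if "LAM" == p then some 3 else if "RAM" == p then some 3
  else if "ST" == p then some 4 else if "CF" == p then some 4 else if "LS" == p then some 4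
  else if "RS" == p then some 4 else if "LF" == p then some 4 else if "RF" == p then some 4
  else if "CDM" == p then some 5 else if "LDM" == p then some 5 else if "RDM" == p then some 5
  else if "CM" == p then some 5 else if "LCM" == p then some 5 else if "RCM" == p then some 5
  else if "CAM" == p then some 5
  else none

-- decode a priority index into the accumulator value (6 = no match yet)
def dec : Nat → Option (Int × String)
  | 0 => some (0, "Goalkeeper")
  | 1 => some (1, "Centre-Back")
  | 2 => some (2, "Full-Back")
  | 3 => some (3, "Winger")
  | 4 => some (4, "Forward")
  | 5 => some (5, "Midfielder")
  | _ => none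

-- B's loop body on an already-normalized token
def stepN (best : Option (Int × String)) (p : String) : Option (Int × String) :=
  match PySem.Dict.get? roleTable p with
  | none => best
  | some pair =>
    match best with
    | none => some pair
    | some b => if pair.1 < b.1 then some pair else best

-- A's if-chain thresholded by an accumulator index j
def chainIdx (b0 b1 b2 b3 b4 b5 : Bool) (j : Nat) : Nat :=
  if b0 ∧ 0 < j then 0 else if b1 ∧ 1 < j then 1 else if b2 ∧ 2 < j then 2
  else if b3 ∧ 3 < j then 3 else if b4 ∧ 4 < j then 4 else if b5 ∧ 5 < j then 5 else j

lemma get?_roleTable (p : String) : PySem.Dict.get? roleTable p = (idxN p).bind dec := by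
  by_cases h1 : p = "GK"
  · subst h1; decide
  by_cases h2 : p = "CB"
  · subst h2; decide
  by_cases h3 : p = "LCB"
  · subst h3; decide
  by_cases h4 : p = "RCB"
  · subst h4; decide
  by_cases h5 : p = "LB"
  · subst h5; decide
  by_cases h6 : p = "RB"
  · subst h6; decide
  by_cases h7 : p = "LWB"
  · subst h7; decide
  by_cases h8 : p = "RWB"
  · subst h8; decide
  by_cases h9 : p = "LW"
  · subst h9; decide
  by_cases h10 : p = "RW"
  · subst h10; decide
  by_cases h11 : p = "LM"
  · subst h11; decide
  by_cases h12 : p = "RM"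
  · subst h12; decide
  by_cases h13 : p = "LAM"
  · subst h13; decide
  by_cases h14 : p = "RAM"
  · subst h14; decide
  by_cases h15 : p = "ST"
  · subst h15; decide
  by_cases h16 : p = "CF"
  · subst h16; decide
  by_cases h17 : p = "LS"
  · subst h17; decide
  by_cases h18 : p = "RS"
  · subst h18; decide
  by_cases h19 : p = "LF"
  · subst h19; decide
  by_cases h20 : p = "RF"
  · subst h20; decide
  by_cases h21 : p = "CDM"
  · subst h21; decide
  by_cases h22 : p = "LDM"
  · subst h22; decide
  by_cases h23 : p = "RDM"
  · subst h23; decide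
  by_cases h24 : p = "CM"
  · subst h24; decide
  by_cases h25 : p = "LCM"
  · subst h25; decide
  by_cases h26 : p = "RCM"
  · subst h26; decide
  by_cases h27 : p = "CAM"
  · subst h27; decide
  have h : roleTable = PySem.Dict.mk
    [("GK", (0, "Goalkeeper")),
   ("CB", (1, "Centre-Back")), ("LCB", (1, "Centre-Back")), ("RCB", (1, "Centre-Back")),
   ("LB", (2, "Full-Back")), ("RB", (2, "Full-Back")), ("LWB", (2, "Full-Back")), ("RWB", (2, "Full-Back")),
   ("LW", (3, "Winger")), ("RW", (3, "Winger")), ("LM", (3, "Winger")),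
   ("RM", (3, "Winger")), ("LAM", (3, "Winger")), ("RAM", (3, "Winger")),
   ("ST", (4, "Forward")), ("CF", (4, "Forward")), ("LS", (4, "Forward")),
   ("RS", (4, "Forward")), ("LF", (4, "Forward")), ("RF", (4, "Forward")),
   ("CDM", (5, "Midfielder")), ("LDM", (5, "Midfielder")), ("RDM", (5, "Midfielder")),
   ("CM", (5, "Midfielder")), ("LCM", (5, "Midfielder")), ("RCM", (5, "Midfielder")),
   ("CAM", (5, "Midfielder"))] := by decide
  rw [h]
  simp only [PySem.Dict.get?_mk_cons, idxN, beq_iff_eq]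
  simp only [if_neg (Ne.symm h1), if_neg (Ne.symm h2), if_neg (Ne.symm h3), if_neg (Ne.symm h4), if_neg (Ne.symm h5), if_neg (Ne.symm h6), if_neg (Ne.symm h7), if_neg (Ne.symm h8), if_neg (Ne.symm h9), if_neg (Ne.symm h10), if_neg (Ne.symm h11), if_neg (Ne.symm h12), if_neg (Ne.symm h13), if_neg (Ne.symm h14), if_neg (Ne.symm h15), if_neg (Ne.symm h16), if_neg (Ne.symm h17), if_neg (Ne.symm h18), if_neg (Ne.symm h19), if_neg (Ne.symm h20), if_neg (Ne.symm h21), if_neg (Ne.symm h22), if_neg (Ne.symm h23), if_neg (Ne.symm h24), if_neg (Ne.symm h25), if_neg (Ne.symm h26), if_neg (Ne.symm h27)]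
  rfl

lemma idxN_le (p : String) (k : Nat) (h : idxN p = some k) : k ≤ 5 := by
  by_cases h1 : p = "GK"
  · subst h1; simp [idxN] at h; omega
  by_cases h2 : p = "CB"
  · subst h2; simp [idxN] at h; omega
  by_cases h3 : p = "LCB"
  · subst h3; simp [idxN] at h; omega
  by_cases h4 : p = "RCB"
  · subst h4; simp [idxN] at h; omega
  by_cases h5 : p = "LB"
  · subst h5; simp [idxN] at h; omega
  by_cases h6 : p = "RB"
  · subst h6; simp [idxN] at h; omega
  by_cases h7 : p = "LWB"
  · subst h7; simp [idxN] at h; omega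
  by_cases h8 : p = "RWB"
  · subst h8; simp [idxN] at h; omega
  by_cases h9 : p = "LW"
  · subst h9; simp [idxN] at h; omega
  by_cases h10 : p = "RW"
  · subst h10; simp [idxN] at h; omega
  by_cases h11 : p = "LM"
  · subst h11; simp [idxN] at h; omega
  by_cases h12 : p = "RM"
  · subst h12; simp [idxN] at h; omega
  by_cases h13 : p = "LAM"
  · subst h13; simp [idxN] at h; omega
  by_cases h14 : p = "RAM"
  · subst h14; simp [idxN] at h; omega
  by_cases h15 : p = "ST"
  · subst h15; simp [idxN] at h; omega
  by_cases h16 : p = "CF"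
  · subst h16; simp [idxN] at h; omega
  by_cases h17 : p = "LS"
  · subst h17; simp [idxN] at h; omega
  by_cases h18 : p = "RS"
  · subst h18; simp [idxN] at h; omega
  by_cases h19 : p = "LF"
  · subst h19; simp [idxN] at h; omega
  by_cases h20 : p = "RF"
  · subst h20; simp [idxN] at h; omega
  by_cases h21 : p = "CDM"
  · subst h21; simp [idxN] at h; omega
  by_cases h22 : p = "LDM"
  · subst h22; simp [idxN] at h; omega
  by_cases h23 : p = "RDM"
  · subst h23; simp [idxN] at h; omega
  by_cases h24 : p = "CM"
  · subst h24; simp [idxN] at h; omega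
  by_cases h25 : p = "LCM"
  · subst h25; simp [idxN] at h; omega
  by_cases h26 : p = "RCM"
  · subst h26; simp [idxN] at h; omega
  by_cases h27 : p = "CAM"
  · subst h27; simp [idxN] at h; omega
  simp [idxN, Ne.symm h1, Ne.symm h2, Ne.symm h3, Ne.symm h4, Ne.symm h5, Ne.symm h6, Ne.symm h7, Ne.symm h8, Ne.symm h9, Ne.symm h10, Ne.symm h11, Ne.symm h12, Ne.symm h13, Ne.symm h14, Ne.symm h15, Ne.symm h16, Ne.symm h17, Ne.symm h18, Ne.symm h19, Ne.symm h20, Ne.symm h21, Ne.symm h22, Ne.symm h23, Ne.symm h24, Ne.symm h25, Ne.symm h26, Ne.symm h27] at h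

lemma step_dec (j : Nat) (hj : j ≤ 6) (p : String) :
    stepN (dec j) p = dec (match idxN p with | none => j | some k => min j k) := by
  cases h : idxN p with
  | none => simp [stepN, get?_roleTable, h]
  | some k =>
    have hk : k ≤ 5 := idxN_le p k h
    unfold stepN
    rw [get?_roleTable, h]
    interval_cases j <;> interval_cases k <;> simp [dec] <;> rfl

lemma head0 (p : String) : (decide ("GK" = p)) = (idxN p == some 0) := by
  by_cases h1 : p = "GK"
  · subst h1; decide
  by_cases h2 : p = "CB"
  · subst h2; decide
  by_cases h3 : p = "LCB"
  · subst h3; decide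
  by_cases h4 : p = "RCB"
  · subst h4; decide
  by_cases h5 : p = "LB"
  · subst h5; decide
  by_cases h6 : p = "RB"
  · subst h6; decide
  by_cases h7 : p = "LWB"
  · subst h7; decide
  by_cases h8 : p = "RWB"
  · subst h8; decide
  by_cases h9 : p = "LW"
  · subst h9; decide
  by_cases h10 : p = "RW"
  · subst h10; decide
  by_cases h11 : p = "LM"
  · subst h11; decide
  by_cases h12 : p = "RM"
  · subst h12; decide
  by_cases h13 : p = "LAM"
  · subst h13; decide
  by_cases h14 : p = "RAM"
  · subst h14; decide
  by_cases h15 : p = "ST"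
  · subst h15; decide
  by_cases h16 : p = "CF"
  · subst h16; decide
  by_cases h17 : p = "LS"
  · subst h17; decide
  by_cases h18 : p = "RS"
  · subst h18; decide
  by_cases h19 : p = "LF"
  · subst h19; decide
  by_cases h20 : p = "RF"
  · subst h20; decide
  by_cases h21 : p = "CDM"
  · subst h21; decide
  by_cases h22 : p = "LDM"
  · subst h22; decide
  by_cases h23 : p = "RDM"
  · subst h23; decide
  by_cases h24 : p = "CM"
  · subst h24; decide
  by_cases h25 : p = "LCM"
  · subst h25; decide
  by_cases h26 : p = "RCM"
  · subst h26; decide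
  by_cases h27 : p = "CAM"
  · subst h27; decide
  simp [idxN, h1, h2, h3, h4, h5, h6, h7, h8, h9, h10, h11, h12, h13, h14, h15, h16, h17, h18, h19, h20, h21, h22, h23, h24, h25, h26, h27, Ne.symm h1, Ne.symm h2, Ne.symm h3, Ne.symm h4, Ne.symm h5, Ne.symm h6, Ne.symm h7, Ne.symm h8, Ne.symm h9, Ne.symm h10, Ne.symm h11, Ne.symm h12, Ne.symm h13, Ne.symm h14, Ne.symm h15, Ne.symm h16, Ne.symm h17, Ne.symm h18, Ne.symm h19, Ne.symm h20, Ne.symm h21, Ne.symm h22, Ne.symm h23, Ne.symm h24, Ne.symm h25, Ne.symm h26, Ne.symm h27]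
lemma head1 (p : String) : (decide (p ∈ cbSet)) = (idxN p == some 1) := by
  by_cases h1 : p = "GK"
  · subst h1; decide
  by_cases h2 : p = "CB"
  · subst h2; decide
  by_cases h3 : p = "LCB"
  · subst h3; decide
  by_cases h4 : p = "RCB"
  · subst h4; decide
  by_cases h5 : p = "LB"
  · subst h5; decide
  by_cases h6 : p = "RB"
  · subst h6; decide
  by_cases h7 : p = "LWB"
  · subst h7; decide
  by_cases h8 : p = "RWB"
  · subst h8; decide
  by_cases h9 : p = "LW"
  · subst h9; decide
  by_cases h10 : p = "RW"
  · subst h10; decide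
  by_cases h11 : p = "LM"
  · subst h11; decide
  by_cases h12 : p = "RM"
  · subst h12; decide
  by_cases h13 : p = "LAM"
  · subst h13; decide
  by_cases h14 : p = "RAM"
  · subst h14; decide
  by_cases h15 : p = "ST"
  · subst h15; decide
  by_cases h16 : p = "CF"
  · subst h16; decide
  by_cases h17 : p = "LS"
  · subst h17; decide
  by_cases h18 : p = "RS"
  · subst h18; decide
  by_cases h19 : p = "LF"
  · subst h19; decide
  by_cases h20 : p = "RF"
  · subst h20; decide
  by_cases h21 : p = "CDM"
  · subst h21; decide
  by_cases h22 : p = "LDM"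
  · subst h22; decide
  by_cases h23 : p = "RDM"
  · subst h23; decide
  by_cases h24 : p = "CM"
  · subst h24; decide
  by_cases h25 : p = "LCM"
  · subst h25; decide
  by_cases h26 : p = "RCM"
  · subst h26; decide
  by_cases h27 : p = "CAM"
  · subst h27; decide
  have hc : cbSet = (["CB", "LCB", "RCB"] : List String) := by decide
  rw [hc]
  simp [List.contains_cons, idxN, h1, h2, h3, h4, h5, h6, h7, h8, h9, h10, h11, h12, h13, h14, h15, h16, h17, h18, h19, h20, h21, h22, h23, h24, h25, h26, h27, Ne.symm h1, Ne.symm h2, Ne.symm h3, Ne.symm h4, Ne.symm h5, Ne.symm h6, Ne.symm h7, Ne.symm h8, Ne.symm h9, Ne.symm h10, Ne.symm h11, Ne.symm h12, Ne.symm h13, Ne.symm h14, Ne.symm h15, Ne.symm h16, Ne.symm h17, Ne.symm h18, Ne.symm h19, Ne.symm h20, Ne.symm h21, Ne.symm h22, Ne.symm h23, Ne.symm h24, Ne.symm h25, Ne.symm h26, Ne.symm h27]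
lemma head2 (p : String) : (decide (p ∈ fbSet)) = (idxN p == some 2) := by
  by_cases h1 : p = "GK"
  · subst h1; decide
  by_cases h2 : p = "CB"
  · subst h2; decide
  by_cases h3 : p = "LCB"
  · subst h3; decide
  by_cases h4 : p = "RCB"
  · subst h4; decide
  by_cases h5 : p = "LB"
  · subst h5; decide
  by_cases h6 : p = "RB"
  · subst h6; decide
  by_cases h7 : p = "LWB"
  · subst h7; decide
  by_cases h8 : p = "RWB"
  · subst h8; decide
  by_cases h9 : p = "LW"
  · subst h9; decide
  by_cases h10 : p = "RW"
  · subst h10; decide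
  by_cases h11 : p = "LM"
  · subst h11; decide
  by_cases h12 : p = "RM"
  · subst h12; decide
  by_cases h13 : p = "LAM"
  · subst h13; decide
  by_cases h14 : p = "RAM"
  · subst h14; decide
  by_cases h15 : p = "ST"
  · subst h15; decide
  by_cases h16 : p = "CF"
  · subst h16; decide
  by_cases h17 : p = "LS"
  · subst h17; decide
  by_cases h18 : p = "RS"
  · subst h18; decide
  by_cases h19 : p = "LF"
  · subst h19; decide
  by_cases h20 : p = "RF"
  · subst h20; decide
  by_cases h21 : p = "CDM"
  · subst h21; decide
  by_cases h22 : p = "LDM"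
  · subst h22; decide
  by_cases h23 : p = "RDM"
  · subst h23; decide
  by_cases h24 : p = "CM"
  · subst h24; decide
  by_cases h25 : p = "LCM"
  · subst h25; decide
  by_cases h26 : p = "RCM"
  · subst h26; decide
  by_cases h27 : p = "CAM"
  · subst h27; decide
  have hc : fbSet = (["LB", "RB", "LWB", "RWB"] : List String) := by decide
  rw [hc]
  simp [List.contains_cons, idxN, h1, h2, h3, h4, h5, h6, h7, h8, h9, h10, h11, h12, h13, h14, h15, h16, h17, h18, h19, h20, h21, h22, h23, h24, h25, h26, h27, Ne.symm h1, Ne.symm h2, Ne.symm h3, Ne.symm h4, Ne.symm h5, Ne.symm h6, Ne.symm h7, Ne.symm h8, Ne.symm h9, Ne.symm h10, Ne.symm h11, Ne.symm h12, Ne.symm h13, Ne.symm h14, Ne.symm h15, Ne.symm h16, Ne.symm h17, Ne.symm h18, Ne.symm h19, Ne.symm h20, Ne.symm h21, Ne.symm h22, Ne.symm h23, Ne.symm h24, Ne.symm h25, Ne.symm h26, Ne.symm h27]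
lemma head3 (p : String) : (decide (p ∈ wingerSet)) = (idxN p == some 3) := by
  by_cases h1 : p = "GK"
  · subst h1; decide
  by_cases h2 : p = "CB"
  · subst h2; decide
  by_cases h3 : p = "LCB"
  · subst h3; decide
  by_cases h4 : p = "RCB"
  · subst h4; decide
  by_cases h5 : p = "LB"
  · subst h5; decide
  by_cases h6 : p = "RB"
  · subst h6; decide
  by_cases h7 : p = "LWB"
  · subst h7; decide
  by_cases h8 : p = "RWB"
  · subst h8; decide
  by_cases h9 : p = "LW"
  · subst h9; decide
  by_cases h10 : p = "RW"
  · subst h10; decide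
  by_cases h11 : p = "LM"
  · subst h11; decide
  by_cases h12 : p = "RM"
  · subst h12; decide
  by_cases h13 : p = "LAM"
  · subst h13; decide
  by_cases h14 : p = "RAM"
  · subst h14; decide
  by_cases h15 : p = "ST"
  · subst h15; decide
  by_cases h16 : p = "CF"
  · subst h16; decide
  by_cases h17 : p = "LS"
  · subst h17; decide
  by_cases h18 : p = "RS"
  · subst h18; decide
  by_cases h19 : p = "LF"
  · subst h19; decide
  by_cases h20 : p = "RF"
  · subst h20; decide
  by_cases h21 : p = "CDM"
  · subst h21; decide
  by_cases h22 : p = "LDM"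
  · subst h22; decide
  by_cases h23 : p = "RDM"
  · subst h23; decide
  by_cases h24 : p = "CM"
  · subst h24; decide
  by_cases h25 : p = "LCM"
  · subst h25; decide
  by_cases h26 : p = "RCM"
  · subst h26; decide
  by_cases h27 : p = "CAM"
  · subst h27; decide
  have hc : wingerSet = (["LW", "RW", "LM", "RM", "LAM", "RAM"] : List String) := by decide
  rw [hc]
  simp [List.contains_cons, idxN, h1, h2, h3, h4, h5, h6, h7, h8, h9, h10, h11, h12, h13, h14, h15, h16, h17, h18, h19, h20, h21, h22, h23, h24, h25, h26, h27, Ne.symm h1, Ne.symm h2, Ne.symm h3, Ne.symm h4, Ne.symm h5, Ne.symm h6, Ne.symm h7, Ne.symm h8, Ne.symm h9, Ne.symm h10, Ne.symm h11, Ne.symm h12, Ne.symm h13, Ne.symm h14, Ne.symm h15, Ne.symm h16, Ne.symm h17, Ne.symm h18, Ne.symm h19, Ne.symm h20, Ne.symm h21, Ne.symm h22, Ne.symm h23, Ne.symm h24, Ne.symm h25, Ne.symm h26, Ne.symm h27]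
lemma head4 (p : String) : (decide (p ∈ fwSet)) = (idxN p == some 4) := by
  by_cases h1 : p = "GK"
  · subst h1; decide
  by_cases h2 : p = "CB"
  · subst h2; decide
  by_cases h3 : p = "LCB"
  · subst h3; decide
  by_cases h4 : p = "RCB"
  · subst h4; decide
  by_cases h5 : p = "LB"
  · subst h5; decide
  by_cases h6 : p = "RB"
  · subst h6; decide
  by_cases h7 : p = "LWB"
  · subst h7; decide
  by_cases h8 : p = "RWB"
  · subst h8; decide
  by_cases h9 : p = "LW"
  · subst h9; decide
  by_cases h10 : p = "RW"
  · subst h10; decide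
  by_cases h11 : p = "LM"
  · subst h11; decide
  by_cases h12 : p = "RM"
  · subst h12; decide
  by_cases h13 : p = "LAM"
  · subst h13; decide
  by_cases h14 : p = "RAM"
  · subst h14; decide
  by_cases h15 : p = "ST"
  · subst h15; decide
  by_cases h16 : p = "CF"
  · subst h16; decide
  by_cases h17 : p = "LS"
  · subst h17; decide
  by_cases h18 : p = "RS"
  · subst h18; decide
  by_cases h19 : p = "LF"
  · subst h19; decide
  by_cases h20 : p = "RF"
  · subst h20; decide
  by_cases h21 : p = "CDM"
  · subst h21; decide
  by_cases h22 : p = "LDM"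
  · subst h22; decide
  by_cases h23 : p = "RDM"
  · subst h23; decide
  by_cases h24 : p = "CM"
  · subst h24; decide
  by_cases h25 : p = "LCM"
  · subst h25; decide
  by_cases h26 : p = "RCM"
  · subst h26; decide
  by_cases h27 : p = "CAM"
  · subst h27; decide
  have hc : fwSet = (["ST", "CF", "LS", "RS", "LF", "RF"] : List String) := by decide
  rw [hc]
  simp [List.contains_cons, idxN, h1, h2, h3, h4, h5, h6, h7, h8, h9, h10, h11, h12, h13, h14, h15, h16, h17, h18, h19, h20, h21, h22, h23, h24, h25, h26, h27, Ne.symm h1, Ne.symm h2, Ne.symm h3, Ne.symm h4, Ne.symm h5, Ne.symm h6, Ne.symm h7, Ne.symm h8, Ne.symm h9, Ne.symm h10, Ne.symm h11, Ne.symm h12, Ne.symm h13, Ne.symm h14, Ne.symm h15, Ne.symm h16, Ne.symm h17, Ne.symm h18, Ne.symm h19, Ne.symm h20, Ne.symm h21, Ne.symm h22, Ne.symm h23, Ne.symm h24, Ne.symm h25, Ne.symm h26, Ne.symm h27]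
lemma head5 (p : String) : (decide (p ∈ mfSet)) = (idxN p == some 5) := by
  by_cases h1 : p = "GK"
  · subst h1; decide
  by_cases h2 : p = "CB"
  · subst h2; decide
  by_cases h3 : p = "LCB"
  · subst h3; decide
  by_cases h4 : p = "RCB"
  · subst h4; decide
  by_cases h5 : p = "LB"
  · subst h5; decide
  by_cases h6 : p = "RB"
  · subst h6; decide
  by_cases h7 : p = "LWB"
  · subst h7; decide
  by_cases h8 : p = "RWB"
  · subst h8; decide
  by_cases h9 : p = "LW"
  · subst h9; decide
  by_cases h10 : p = "RW"
  · subst h10; decide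
  by_cases h11 : p = "LM"
  · subst h11; decide
  by_cases h12 : p = "RM"
  · subst h12; decide
  by_cases h13 : p = "LAM"
  · subst h13; decide
  by_cases h14 : p = "RAM"
  · subst h14; decide
  by_cases h15 : p = "ST"
  · subst h15; decide
  by_cases h16 : p = "CF"
  · subst h16; decide
  by_cases h17 : p = "LS"
  · subst h17; decide
  by_cases h18 : p = "RS"
  · subst h18; decide
  by_cases h19 : p = "LF"
  · subst h19; decide
  by_cases h20 : p = "RF"
  · subst h20; decide
  by_cases h21 : p = "CDM"
  · subst h21; decide
  by_cases h22 : p = "LDM"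
  · subst h22; decide
  by_cases h23 : p = "RDM"
  · subst h23; decide
  by_cases h24 : p = "CM"
  · subst h24; decide
  by_cases h25 : p = "LCM"
  · subst h25; decide
  by_cases h26 : p = "RCM"
  · subst h26; decide
  by_cases h27 : p = "CAM"
  · subst h27; decide
  have hc : mfSet = (["CDM", "LDM", "RDM", "CM", "LCM", "RCM", "CAM"] : List String) := by decide
  rw [hc]
  simp [List.contains_cons, idxN, h1, h2, h3, h4, h5, h6, h7, h8, h9, h10, h11, h12, h13, h14, h15, h16, h17, h18, h19, h20, h21, h22, h23, h24, h25, h26, h27, Ne.symm h1, Ne.symm h2, Ne.symm h3, Ne.symm h4, Ne.symm h5, Ne.symm h6, Ne.symm h7, Ne.symm h8, Ne.symm h9, Ne.symm h10, Ne.symm h11, Ne.symm h12, Ne.symm h13, Ne.symm h14, Ne.symm h15, Ne.symm h16, Ne.symm h17, Ne.symm h18, Ne.symm h19, Ne.symm h20, Ne.symm h21, Ne.symm h22, Ne.symm h23, Ne.symm h24, Ne.symm h25, Ne.symm h26, Ne.symm h27]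

-- the first true index (6 if none)
def firstIdx (b0 b1 b2 b3 b4 b5 : Bool) : Nat :=
  if b0 then 0 else if b1 then 1 else if b2 then 2 else if b3 then 3
  else if b4 then 4 else if b5 then 5 else 6

lemma chainIdx_eq_min (b0 b1 b2 b3 b4 b5 : Bool) (j : Nat) (hj : j ≤ 6) :
    chainIdx b0 b1 b2 b3 b4 b5 j = min j (firstIdx b0 b1 b2 b3 b4 b5) := by
  cases b0 <;> cases b1 <;> cases b2 <;> cases b3 <;> cases b4 <;> cases b5 <;>
    simp [chainIdx, firstIdx] <;> first | omega | (split_ifs <;> omega)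

lemma firstIdx_or (k : Nat) (hk : k ≤ 5) (b0 b1 b2 b3 b4 b5 : Bool) :
    firstIdx (b0 || (k == 0)) (b1 || (k == 1)) (b2 || (k == 2)) (b3 || (k == 3))
      (b4 || (k == 4)) (b5 || (k == 5))
      = min (firstIdx b0 b1 b2 b3 b4 b5) k := by
  interval_cases k <;> cases b0 <;> cases b1 <;> cases b2 <;> cases b3 <;> cases b4 <;>
    cases b5 <;> simp [firstIdx]

lemma chainIdx_true (k : Nat) (hk : k ≤ 5) (b0 b1 b2 b3 b4 b5 : Bool) (j : Nat) (hj : j ≤ 6) :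
    chainIdx (b0 || (k == 0)) (b1 || (k == 1)) (b2 || (k == 2)) (b3 || (k == 3))
      (b4 || (k == 4)) (b5 || (k == 5)) j
      = chainIdx b0 b1 b2 b3 b4 b5 (min j k) := by
  rw [chainIdx_eq_min _ _ _ _ _ _ j hj, chainIdx_eq_min _ _ _ _ _ _ (min j k) (by omega),
    firstIdx_or k hk]
  omega

def h0 (ps : List String) : Bool := ps.contains "GK"
def h1 (ps : List String) : Bool := ps.any (fun p => PySem.Set.contains cbSet p)
def h2 (ps : List String) : Bool := ps.any (fun p => PySem.Set.contains fbSet p)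
def h3 (ps : List String) : Bool := ps.any (fun p => PySem.Set.contains wingerSet p)
def h4 (ps : List String) : Bool := ps.any (fun p => PySem.Set.contains fwSet p)
def h5 (ps : List String) : Bool := ps.any (fun p => PySem.Set.contains mfSet p)

lemma main_fold (ps : List String) : ∀ j, j ≤ 6 →
    ps.foldl stepN (dec j) = dec (chainIdx (h0 ps) (h1 ps) (h2 ps) (h3 ps) (h4 ps) (h5 ps) j) := by
  induction ps with
  | nil => intro j hj; simp [h0, h1, h2, h3, h4, h5, chainIdx]
  | cons p ps ih =>
    intro j hj
    rw [List.foldl_cons, step_dec j hj p]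
    have hh0 : h0 (p :: ps) = ((idxN p == some 0) || h0 ps) := by
      simp [h0, List.contains_cons, head0]
    have hh1 : h1 (p :: ps) = ((idxN p == some 1) || h1 ps) := by
      simp [h1, List.any_cons, head1]
    have hh2 : h2 (p :: ps) = ((idxN p == some 2) || h2 ps) := by
      simp [h2, List.any_cons, head2]
    have hh3 : h3 (p :: ps) = ((idxN p == some 3) || h3 ps) := by
      simp [h3, List.any_cons, head3]
    have hh4 : h4 (p :: ps) = ((idxN p == some 4) || h4 ps) := by
      simp [h4, List.any_cons, head4]
    have hh5 : h5 (p :: ps) = ((idxN p == some 5) || h5 ps) := by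
      simp [h5, List.any_cons, head5]
    rw [hh0, hh1, hh2, hh3, hh4, hh5]
    cases hx : idxN p with
    | none =>
      have hred : (match (none : Option Nat) with | none => j | some k => min j k) = j := rfl
      rw [hred, ih j hj]
      simp
    | some k =>
      have hk : k ≤ 5 := idxN_le p k hx
      have hred : (match (some k : Option Nat) with | none => j | some k => min j k)
          = min j k := rfl
      rw [hred, ih (min j k) (by omega), ← chainIdx_true k hk _ _ _ _ _ _ j hj]
      simp [Bool.or_comm]

lemma chain_final (b0 b1 b2 b3 b4 b5 : Bool) :
    (if b0 then some "Goalkeeper"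
     else if b1 then some "Centre-Back"
     else if b2 then some "Full-Back"
     else if b3 then some "Winger"
     else if b4 then some "Forward"
     else if b5 then some "Midfielder"
     else none)
    = (match dec (chainIdx b0 b1 b2 b3 b4 b5 6) with
       | none => none
       | some b => some b.2) := by
  cases b0 <;> cases b1 <;> cases b2 <;> cases b3 <;> cases b4 <;> cases b5 <;> rfl

-- ===== VERDICT (by name: the statement is the Claim_ definition above) =====
set_option maxHeartbeats 2000000 in
theorem map_fifa_positions_to_role_spec : Claim_equal_map_fifa_positions_to_role := by
  intro s _
  unfold Spec_map_fifa_positions_to_role map_fifa_positions_to_role map_fifa_positions_to_role_alt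
  by_cases hs : (PySem.Str.strip s == "") = true
  · rw [if_pos hs, if_pos hs]
  · rw [if_neg hs, if_neg hs]
    dsimp only
    have hstep : (fun (best : Option (Int × String)) (raw : String) =>
        match PySem.Dict.get? roleTable (PySem.Str.upper (PySem.Str.strip raw)) with
        | none => best
        | some pair =>
          match best with
          | none => some pair
          | some b => if pair.1 < b.1 then some pair else best)
        = (fun best raw => stepN best (PySem.Str.upper (PySem.Str.strip raw))) := rfl
    rw [hstep, ← List.foldl_map]
    have hm : (((PySem.Str.split? s ",").getD []).map
          (fun p => PySem.Str.upper (PySem.Str.strip p))).foldl stepN none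
        = dec (chainIdx
            (h0 (((PySem.Str.split? s ",").getD []).map (fun p => PySem.Str.upper (PySem.Str.strip p))))
            (h1 (((PySem.Str.split? s ",").getD []).map (fun p => PySem.Str.upper (PySem.Str.strip p))))
            (h2 (((PySem.Str.split? s ",").getD []).map (fun p => PySem.Str.upper (PySem.Str.strip p))))
            (h3 (((PySem.Str.split? s ",").getD []).map (fun p => PySem.Str.upper (PySem.Str.strip p))))
            (h4 (((PySem.Str.split? s ",").getD []).map (fun p => PySem.Str.upper (PySem.Str.strip p))))
            (h5 (((PySem.Str.split? s ",").getD []).map (fun p => PySem.Str.upper (PySem.Str.strip p))))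
            6) :=
      main_fold _ 6 (by norm_num)
    rw [hm]
    exact chain_final _ _ _ _ _ _
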